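-- pv_equiv track=rewrite | github.com/Kunstenpunt/externe_vragen | wikipedia_voor_bart/importdata/query.py | _jarenlijst_naar_periode
-- ===== SOURCE A (Python) =====
-- def _jarenlijst_naar_periode(jarenlijst):
--     jaren = sorted(jarenlijst)
--     periodes = []
--     periode = {"start": jaren[0], "einde": jaren[0]}
--     for jaar in jaren[1:]:
--         if (jaar - periode["einde"] - 1) == 0:
--             periode["einde"] = jaar
--         else:
--             periodes.append(periode)
--             periode = {"start": jaar, "einde": jaar}
--     periodes.append(periode)
--     return periodes
-- ===== SOURCE B (Python) =====
-- def _jarenlijst_naar_periode(jarenlijst):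
--     jaren = sorted(jarenlijst)
--     gaps = [(a, b) for a, b in zip(jaren, jaren[1:]) if b - a != 1]
--     starts = [jaren[0]] + [b for _, b in gaps]
--     ends = [a for a, _ in gaps] + [jaren[-1]]
--     return [{"start": s, "einde": e} for s, e in zip(starts, ends)]
-- ===== Notes on version B (the rewrite author's own statement) =====
-- stated objective: alternative
-- what changed: Replaces A's stateful single pass that mutates a current-period dict with a declarative decomposition: compute the gap pairs (adjacent sorted elements whose difference is not 1) once, derive the start and end lists from them, and zip them into periods.
import Mathlib
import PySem

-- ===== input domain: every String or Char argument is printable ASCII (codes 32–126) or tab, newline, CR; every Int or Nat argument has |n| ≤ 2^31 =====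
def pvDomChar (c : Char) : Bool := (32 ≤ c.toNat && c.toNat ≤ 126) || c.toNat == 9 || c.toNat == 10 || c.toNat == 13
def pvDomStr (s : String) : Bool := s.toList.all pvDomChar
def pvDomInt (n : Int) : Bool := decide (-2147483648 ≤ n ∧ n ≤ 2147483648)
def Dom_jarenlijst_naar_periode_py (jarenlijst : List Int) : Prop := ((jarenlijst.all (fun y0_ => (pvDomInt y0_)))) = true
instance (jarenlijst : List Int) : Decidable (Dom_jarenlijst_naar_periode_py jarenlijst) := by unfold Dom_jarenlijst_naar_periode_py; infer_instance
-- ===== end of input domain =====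

-- B replaces A's stateful dict-mutating pass with a gap-pairs/zip decomposition; equivalence on non-empty inputs.

-- ===== PORT A =====
-- literal port of A's loop: state = (periodes, current periode dict)
def jarenlijst_naar_periode_py (jarenlijst : List Int) : List (List (String × Int)) :=
  match PySem.List.sorted jarenlijst (fun x => x) false with
  | [] => []   -- Python raises IndexError (jaren[0]) here; excluded by Pre_
  | j0 :: rest =>
    let periode : PySem.Dict String Int := (PySem.Dict.empty.insert "start" j0).insert "einde" j0
    let st := rest.foldl
      (fun (st : List (PySem.Dict String Int) × PySem.Dict String Int) jaar =>
        let (periodes, periode) := st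
        if jaar - periode.getD "einde" 0 - 1 = 0 then
          (periodes, periode.insert "einde" jaar)
        else
          (periodes ++ [periode], (PySem.Dict.empty.insert "start" jaar).insert "einde" jaar))
      ([], periode)
    (st.1 ++ [st.2]).map PySem.Dict.items

-- ===== PORT B =====
def jarenlijst_naar_periode_py_alt (jarenlijst : List Int) : List (List (String × Int)) :=
  match PySem.List.sorted jarenlijst (fun x => x) false with
  | [] => []   -- Python raises IndexError (jaren[0]) here; excluded by Pre_
  | j0 :: rest =>
    let jaren := j0 :: rest
    let gaps := (jaren.zip rest).filter (fun p => p.2 - p.1 ≠ 1)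
    let starts := j0 :: gaps.map (·.2)
    let ends := gaps.map (·.1) ++ [jaren.getLast (by simp)]
    (starts.zip ends).map (fun p => [("start", p.1), ("einde", p.2)])

-- ===== PRECONDITION & SPEC =====
-- Pre_ excludes exactly the empty list, on which Python A raises IndexError (jaren[0]).
def Pre_jarenlijst_naar_periode_py (jarenlijst : List Int) : Prop := jarenlijst ≠ []
instance (jarenlijst : List Int) : Decidable (Pre_jarenlijst_naar_periode_py jarenlijst) := by unfold Pre_jarenlijst_naar_periode_py; infer_instance
def pvWitness_jarenlijst_naar_periode_py : List Int := [1999, 2001, 2000, 2005]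

def Spec_jarenlijst_naar_periode_py (jarenlijst : List Int) (out : List (List (String × Int))) : Prop := out = jarenlijst_naar_periode_py_alt jarenlijst
instance (jarenlijst : List Int) (out : List (List (String × Int))) : Decidable (Spec_jarenlijst_naar_periode_py jarenlijst out) := by unfold Spec_jarenlijst_naar_periode_py; infer_instance

-- ===== CLAIM (what is proved, stated in full; the proofs are below) =====
def Claim_equal_jarenlijst_naar_periode_py : Prop := ∀ (jarenlijst : List Int), Dom_jarenlijst_naar_periode_py jarenlijst → Pre_jarenlijst_naar_periode_py jarenlijst → Spec_jarenlijst_naar_periode_py jarenlijst (jarenlijst_naar_periode_py jarenlijst)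

-- ===== LEMMAS AND PROOFS =====

-- canonical segment splitter: (start, einde) runs of a list, given current run (s, e)
def pvSegs (s e : Int) : List Int → List (Int × Int)
  | [] => [(s, e)]
  | y :: ys => if y - e - 1 = 0 then pvSegs s y ys else (s, e) :: pvSegs y y ys

-- A's fold equals accumulated prefix ++ segments (as dicts)
theorem pvFoldA (rest : List Int) : ∀ (acc : List (PySem.Dict String Int)) (s e : Int),
    (let st := rest.foldl
      (fun (st : List (PySem.Dict String Int) × PySem.Dict String Int) jaar =>
        let (periodes, periode) := st
        if jaar - periode.getD "einde" 0 - 1 = 0 then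
          (periodes, periode.insert "einde" jaar)
        else
          (periodes ++ [periode], (PySem.Dict.empty.insert "start" jaar).insert "einde" jaar))
      (acc, (PySem.Dict.empty.insert "start" s).insert "einde" e)
     st.1 ++ [st.2])
    = acc ++ (pvSegs s e rest).map (fun p => (PySem.Dict.empty.insert "start" p.1).insert "einde" p.2) := by
  induction rest with
  | nil => intro acc s e; simp [pvSegs]
  | cons y ys ih =>
    intro acc s e
    simp only [List.foldl_cons, pvSegs]
    by_cases h : y - e - 1 = 0
    · simpa [h, PySem.Dict.getD, PySem.Dict.get?, PySem.Dict.insert, PySem.Dict.empty] using ih acc s y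
    · simpa [h, PySem.Dict.getD, PySem.Dict.get?, PySem.Dict.insert, PySem.Dict.empty] using ih (acc ++ [(PySem.Dict.empty.insert "start" s).insert "einde" e]) y y

-- B's gap/zip decomposition equals the segments
theorem pvZipB (rest : List Int) : ∀ (s e : Int),
    (let gaps := ((e :: rest).zip rest).filter (fun p => p.2 - p.1 ≠ 1)
     (( s :: gaps.map (·.2)).zip (gaps.map (·.1) ++ [(e :: rest).getLast (by simp)])))
    = pvSegs s e rest := by
  induction rest with
  | nil => intro s e; simp [pvSegs]
  | cons y ys ih =>
    intro s e
    simp only [pvSegs]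
    by_cases h : y - e - 1 = 0
    · have h1 : y - e = 1 := by omega
      have := ih s y
      simp only [List.zip_cons_cons, List.filter_cons] at *
      simpa [h1, h, List.getLast] using this
    · have h1 : ¬ (y - e = 1) := by omega
      have := ih y y
      simp only [List.zip_cons_cons, List.filter_cons] at *
      simpa [h1, h, List.getLast] using this

theorem dict_items_pair (s e : Int) :
    ((PySem.Dict.empty.insert "start" s).insert ("einde" : String) e).items = [("start", s), ("einde", e)] := by
  simp [PySem.Dict.insert, PySem.Dict.empty, PySem.Dict.contains]

-- ===== VERDICT (by name: the statement is the Claim_ definition above) =====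
theorem jarenlijst_naar_periode_py_spec : Claim_equal_jarenlijst_naar_periode_py := by
  intro jarenlijst _ hpre
  unfold Spec_jarenlijst_naar_periode_py jarenlijst_naar_periode_py jarenlijst_naar_periode_py_alt
  have hne : PySem.List.sorted jarenlijst (fun x => x) false ≠ [] := by
    intro h
    exact hpre (List.Perm.eq_nil (h ▸ PySem.List.sorted_perm jarenlijst (fun x => x) false).symm)
  cases hs : PySem.List.sorted jarenlijst (fun x => x) false with
  | nil => exact absurd hs hne
  | cons j0 rest =>
    simp only
    rw [pvFoldA rest [] j0 j0, ← pvZipB rest j0 j0]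
    simp [List.map_map, Function.comp, dict_items_pair]
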